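-- pv_equiv track=rewrite | github.com/kstodolak/advent-of-code | 2023/day10/solve.py | extend_map
-- ===== SOURCE A (Python) =====
-- def extend_map(M):
--   new_M = []
--   for y in range(len(M)):
--     new_M.append(M[y])
--     new_row = ['_' for _ in range(len(M[y]))]
--     for x in range(len(M[y])):
--       c = M[y][x]
--       if c in ['S', 'F', '7', '|']:
--         new_row[x] = '|'
--     if new_row.count('_') != len(new_row):
--       new_M.append(new_row)
--
--   M = new_M
--   for y in range(len(M)):
--     new_row = []
--     for x in range(len(M[y])-1):
--       c = M[y][x]
--       new_row.append(c)
--       if c in ['S', '-', 'F', 'L']: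
--         new_row.append('-')
--       else:
--         new_row.append('_')
--     M[y] = new_row
--
--   return M
-- ===== SOURCE B (Python) =====
-- def extend_map(M):
--   out = []
--   for row in M:
--     out.append([t for c in row[:-1]
--                   for t in (c, '-' if c in {'S', '-', 'F', 'L'} else '_')])
--     if any(c in {'S', 'F', '7', '|'} for c in row):
--       out.append([t for c in row[:-1]
--                     for t in ('|' if c in {'S', 'F', '7', '|'} else '_', '_')])
--   return out
-- ===== Notes on version B (the rewrite author's own statement) =====
-- stated objective: simpler
-- what changed: B fuses A's two sequential passes (build an intermediate vertically-expanded grid, then horizontally expand every row of it in place) into a single loop over the original rows that emits each horizontally-expanded row and, when needed, its horizontally-expanded connector row directly, with no intermediate grid.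
import Mathlib
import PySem

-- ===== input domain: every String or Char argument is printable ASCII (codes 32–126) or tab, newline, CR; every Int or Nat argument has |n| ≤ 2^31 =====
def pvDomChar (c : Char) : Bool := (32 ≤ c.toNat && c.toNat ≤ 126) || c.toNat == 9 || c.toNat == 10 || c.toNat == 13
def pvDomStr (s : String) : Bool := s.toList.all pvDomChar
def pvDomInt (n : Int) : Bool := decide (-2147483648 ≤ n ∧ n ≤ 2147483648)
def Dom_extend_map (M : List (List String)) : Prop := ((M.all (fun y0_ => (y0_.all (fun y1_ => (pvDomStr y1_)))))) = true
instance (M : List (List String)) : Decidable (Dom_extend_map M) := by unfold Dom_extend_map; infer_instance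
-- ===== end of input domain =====

-- B fuses A's two sequential passes into ONE loop over the original rows (alternative decomposition, no intermediate grid); return values proved equal.

-- ===== PORT A =====
-- first inner loop of A: new_row = ['_']*len, then '|' where the cell is a vertical connector
def aVertRow (r : List String) : List String :=
  r.map (fun c => if c ∈ (["S", "F", "7", "|"] : List String) then "|" else "_")

-- body of A's first loop over y
def aStep1 (acc : List (List String)) (r : List String) : List (List String) :=
  let acc' := acc ++ [r]
  let newRow := aVertRow r
  if newRow.count "_" ≠ newRow.length then acc' ++ [newRow] else acc'

-- A's second loop body: for x in range(len(r)-1): append c, then '-' or '_'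
def aExpandRow (r : List String) : List String :=
  (List.range (r.length - 1)).foldl
    (fun nr x =>
      let c := r.getD x ""
      (nr ++ [c]) ++ [if c ∈ (["S", "-", "F", "L"] : List String) then "-" else "_"]) []

def extend_map (M : List (List String)) : List (List String) :=
  (M.foldl aStep1 []).map aExpandRow

-- ===== PORT B =====
def bDash (c : String) : String :=
  if c ∈ (["S", "-", "F", "L"] : List String) then "-" else "_"

def bIsVert (c : String) : Bool :=
  c ∈ (["S", "F", "7", "|"] : List String)

-- horizontally expanded content row: comprehension over row[:-1]
def bHoriz (r : List String) : List String :=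
  r.dropLast.flatMap (fun c => [c, bDash c])

-- horizontally expanded vertical-connector row (its second slot is always '_')
def bConn (r : List String) : List String :=
  r.dropLast.flatMap (fun c => [if bIsVert c then "|" else "_", "_"])

def bStep (out : List (List String)) (r : List String) : List (List String) :=
  let out' := out ++ [bHoriz r]
  if r.any bIsVert then out' ++ [bConn r] else out'

def extend_map_alt (M : List (List String)) : List (List String) :=
  M.foldl bStep []

-- ===== PRECONDITION & SPEC =====
def Spec_extend_map (M : List (List String)) (out : List (List String)) : Prop := out = extend_map_alt M
instance (M : List (List String)) (out : List (List String)) : Decidable (Spec_extend_map M out) := by unfold Spec_extend_map; infer_instance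

-- ===== CLAIM (what is proved, stated in full; the proofs are below) =====
def Claim_equal_extend_map : Prop := ∀ (M : List (List String)), Dom_extend_map M → Spec_extend_map M (extend_map M)

-- ===== LEMMAS AND PROOFS =====

-- range-indexed foldl that appends a block per index = flatMap
theorem foldl_range_getD_append (f : String → List String) :
    ∀ (l : List String) (init : List String),
      (List.range l.length).foldl (fun nr x => nr ++ f (l.getD x "")) init
        = init ++ l.flatMap f := by
  intro l
  induction l with
  | nil => intro init; simp
  | cons a tl ih =>
      intro init
      rw [List.length_cons, List.range_succ_eq_map, List.foldl_cons, List.foldl_map]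
      have hfun : (fun (nr : List String) (x : ℕ) => nr ++ f ((a :: tl).getD (x + 1) ""))
          = fun nr x => nr ++ f (tl.getD x "") := by
        funext nr x; simp
      rw [hfun, ih]
      simp

-- indices used by aExpandRow stay inside dropLast
theorem getD_dropLast (r : List String) (x : ℕ) (hx : x < r.length - 1) :
    r[x]?.getD "" = r.dropLast[x]?.getD "" := by
  have hx' : x < r.dropLast.length := by simpa [List.length_dropLast] using hx
  have hxr : x < r.length := by omega
  rw [List.getElem?_eq_getElem hxr, List.getElem?_eq_getElem hx']
  simp [List.getElem_dropLast]

-- A's by-index expansion equals B's flatMap over row[:-1]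
theorem aExpandRow_eq_bHoriz (r : List String) : aExpandRow r = bHoriz r := by
  unfold aExpandRow bHoriz
  have h1 : (List.range (r.length - 1)).foldl
      (fun nr x =>
        let c := r.getD x ""
        (nr ++ [c]) ++ [if c ∈ (["S", "-", "F", "L"] : List String) then "-" else "_"]) []
      = (List.range (r.dropLast.length)).foldl
        (fun nr x => nr ++ [r.dropLast.getD x "", bDash (r.dropLast.getD x "")]) [] := by
    rw [List.length_dropLast]
    apply List.foldl_ext
    intro acc x hx
    have hx' : x < r.length - 1 := by simpa using List.mem_range.mp hx
    simp [getD_dropLast r x hx', bDash, List.append_assoc]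
  rw [h1, foldl_range_getD_append (fun c => [c, bDash c]) r.dropLast []]
  simp

-- A's count test on the connector row ↔ B's any test on the original row
theorem count_test_iff_any (r : List String) :
    ((aVertRow r).count "_" ≠ (aVertRow r).length) ↔ r.any bIsVert = true := by
  rw [Ne, List.count_eq_length]
  simp only [aVertRow, List.mem_map, List.any_eq_true, bIsVert]
  constructor
  · intro h
    by_contra hno
    push Not at hno
    apply h
    rintro b ⟨c, hc, rfl⟩
    have := hno c hc
    simpa using this
  · rintro ⟨c, hc, hv⟩ hall
    have hm : c ∈ (["S", "F", "7", "|"] : List String) := of_decide_eq_true hv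
    have := hall _ ⟨c, hc, rfl⟩
    rw [if_pos hm] at this
    exact absurd this (by decide)

-- expanding A's connector row = B's expanded connector row
theorem bHoriz_vertRow (r : List String) : bHoriz (aVertRow r) = bConn r := by
  unfold bHoriz bConn aVertRow
  rw [← List.map_dropLast, List.flatMap_map]
  apply List.flatMap_congr
  intro c _
  by_cases h : c ∈ (["S", "F", "7", "|"] : List String) <;>
    simp [h, bDash, bIsVert]

-- fold-accumulator lemma for B
theorem bFold_acc : ∀ (M : List (List String)) (out : List (List String)),
    M.foldl bStep out = out ++ M.foldl bStep [] := by
  intro M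
  induction M with
  | nil => intro out; simp
  | cons r M' ih =>
      intro out
      simp only [List.foldl_cons]
      rw [ih (bStep out r), ih (bStep [] r)]
      unfold bStep
      by_cases h : r.any bIsVert = true <;> simp [h, List.append_assoc]

-- main fusion lemma: mapping the expansion over A's pass-1 output = B's single pass
theorem fusion : ∀ (M : List (List String)) (acc : List (List String)),
    (M.foldl aStep1 acc).map aExpandRow = acc.map aExpandRow ++ M.foldl bStep [] := by
  intro M
  induction M with
  | nil => intro acc; simp
  | cons r M' ih =>
      intro acc
      simp only [List.foldl_cons]
      rw [ih (aStep1 acc r), bFold_acc M' (bStep [] r)]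
      have hstep : (aStep1 acc r).map aExpandRow = acc.map aExpandRow ++ bStep [] r := by
        unfold aStep1 bStep
        by_cases h : r.any bIsVert = true
        · rw [if_pos ((count_test_iff_any r).mpr h), if_pos h]
          simp [aExpandRow_eq_bHoriz, bHoriz_vertRow]
        · rw [if_neg (fun hc => h ((count_test_iff_any r).mp hc)), if_neg h]
          simp [aExpandRow_eq_bHoriz]
      rw [hstep, List.append_assoc]

-- ===== VERDICT (by name: the statement is the Claim_ definition above) =====
theorem extend_map_spec : Claim_equal_extend_map := by
  intro M _
  unfold Spec_extend_map extend_map extend_map_alt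
  simpa using fusion M []
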